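-- pv_equiv track=rewrite | github.com/981377660LMT/algorithm-study | 22_专题/前缀与差分/两个相邻的数字加一减一变为全0-不变量.py | arcWrecker2
-- ===== SOURCE A (Python) =====
-- from collections import defaultdict
-- from typing import List
--
-- def arcWrecker2(nums: List[int]) -> int:
--     preSum = defaultdict(int, {0: 1})  # 如果记录索引就是{0: -1}
--     res, curSum = 0, 0
--     for i, num in enumerate(nums):
--         curSum += num if i & 1 else -num
--         if curSum in preSum:
--             res += preSum[curSum]
--         preSum[curSum] += 1
--     return res
-- ===== SOURCE B (Python) =====
-- from collections import Counter
-- from typing import List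
--
-- def arcWrecker2(nums: List[int]) -> int:
--     preSums = [0]
--     curSum = 0
--     for i, num in enumerate(nums):
--         curSum += num if i & 1 else -num
--         preSums.append(curSum)
--     return sum(c * (c - 1) // 2 for c in Counter(preSums).values())
-- ===== Notes on version B (the rewrite author's own statement) =====
-- stated objective: alternative
-- what changed: Replaces A's single online pass (add the dict's count of the current prefix sum to the result, then increment it) with a two-pass scheme: first materialise the full alternating prefix-sum list starting at 0, then Counter it and return the sum of c*(c-1)//2 over the counts.
import Mathlib
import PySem

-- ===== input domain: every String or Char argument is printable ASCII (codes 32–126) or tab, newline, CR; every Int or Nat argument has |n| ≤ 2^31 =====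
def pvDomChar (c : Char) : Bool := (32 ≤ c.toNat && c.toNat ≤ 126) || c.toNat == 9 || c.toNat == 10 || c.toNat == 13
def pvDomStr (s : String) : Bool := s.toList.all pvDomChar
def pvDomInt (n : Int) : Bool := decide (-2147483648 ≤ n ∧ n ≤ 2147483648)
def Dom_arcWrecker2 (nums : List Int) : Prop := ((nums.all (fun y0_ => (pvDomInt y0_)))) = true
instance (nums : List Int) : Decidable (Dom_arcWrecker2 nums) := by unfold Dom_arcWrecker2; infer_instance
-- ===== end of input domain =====

-- B replaces A's online "add previous occurrences, then increment" pass with a two-pass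
-- collect-prefix-sums-then-Counter count, summing c*(c-1)//2 per value (objective: alternative).

-- ===== PORT A =====
-- one loop iteration of A: state is (preSum, res, curSum), input is (i, num)
def pvStepA (st : PySem.Dict Int Int × Int × Int) (p : Int × Int) :
    PySem.Dict Int Int × Int × Int :=
  let curSum := st.2.2 + (if PySem.Int.band p.1 1 ≠ 0 then p.2 else -p.2)
  let res := if st.1.contains curSum then st.2.1 + st.1.getD curSum 0 else st.2.1
  (st.1.modify curSum 0 (· + 1), res, curSum)

def arcWrecker2 (nums : List Int) : Int :=
  ((PySem.List.enumerate nums).foldl pvStepA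
    (PySem.Dict.ofList [((0 : Int), (1 : Int))], 0, 0)).2.1

-- ===== PORT B =====
-- one loop iteration of B: state is (preSums, curSum), input is (i, num)
def pvStepB (st : List Int × Int) (p : Int × Int) : List Int × Int :=
  let curSum := st.2 + (if PySem.Int.band p.1 1 ≠ 0 then p.2 else -p.2)
  (st.1 ++ [curSum], curSum)

def arcWrecker2_alt (nums : List Int) : Int :=
  let preSums := ((PySem.List.enumerate nums).foldl pvStepB ([0], 0)).1
  ((PySem.Dict.counter preSums).values).foldl
    (fun a c => a + PySem.Int.floordiv (c * (c - 1)) 2) 0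

-- ===== PRECONDITION & SPEC =====
def Spec_arcWrecker2 (nums : List Int) (out : Int) : Prop := out = arcWrecker2_alt nums
instance (nums : List Int) (out : Int) : Decidable (Spec_arcWrecker2 nums out) := by unfold Spec_arcWrecker2; infer_instance

-- ===== CLAIM (what is proved, stated in full; the proofs are below) =====
def Claim_equal_arcWrecker2 : Prop := ∀ (nums : List Int), Dom_arcWrecker2 nums → Spec_arcWrecker2 nums (arcWrecker2 nums)

-- ===== LEMMAS AND PROOFS =====

-- the list of alternating prefix sums produced from start value s by the enumerated pairs
def pvGen : List (Int × Int) → Int → List Int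
  | [], _ => []
  | p :: ps, s =>
    let s' := s + (if PySem.Int.band p.1 1 ≠ 0 then p.2 else -p.2)
    s' :: pvGen ps s'

-- A's loop with the prefix-sum values already materialised
def pvStep1 (st : PySem.Dict Int Int × Int) (v : Int) : PySem.Dict Int Int × Int :=
  (st.1.modify v 0 (· + 1), if st.1.contains v then st.2 + st.1.getD v 0 else st.2)

def pvG (c : Int) : Int := PySem.Int.floordiv (c * (c - 1)) 2

-- B's final combinatorial sum as a function of the prefix-sum list
def pvS (l : List Int) : Int :=
  ((PySem.Dict.counter l).values).foldl (fun a c => a + pvG c) 0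

theorem pvBridgeA : ∀ (ps : List (Int × Int)) (d : PySem.Dict Int Int) (r s : Int),
    ((ps.foldl pvStepA (d, r, s)).1, (ps.foldl pvStepA (d, r, s)).2.1)
      = (pvGen ps s).foldl pvStep1 (d, r) := by
  intro ps
  induction ps with
  | nil => intro d r s; rfl
  | cons p ps ih =>
    intro d r s
    simp only [List.foldl_cons, pvGen, pvStepA, pvStep1]
    exact ih _ _ _

theorem pvBridgeB : ∀ (ps : List (Int × Int)) (acc : List Int) (s : Int),
    (ps.foldl pvStepB (acc, s)).1 = acc ++ pvGen ps s := by
  intro ps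
  induction ps with
  | nil => intro acc s; simp [pvGen]
  | cons p ps ih =>
    intro acc s
    simp only [List.foldl_cons, pvStepB, pvGen]
    rw [ih]
    simp

theorem pvG_succ (c : Int) : pvG (c + 1) = pvG c + c := by
  unfold pvG
  have h2 : (2 : Int) ≠ 0 := by norm_num
  have he : (c + 1) * (c + 1 - 1) = c * (c - 1) + c * 2 := by ring
  rw [he, PySem.Int.floordiv_eq_ediv_of_pos (by norm_num),
      PySem.Int.floordiv_eq_ediv_of_pos (by norm_num),
      Int.add_mul_ediv_right _ _ h2]

theorem pvFoldlAdd (f : Int → Int) : ∀ (L : List Int) (a : Int),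
    L.foldl (fun a c => a + f c) a = a + (L.map f).sum := by
  intro L
  induction L with
  | nil => intro a; simp
  | cons x L ih => intro a; simp [ih]; ring

theorem pvSumMapUpdate : ∀ (K : List Int), K.Nodup → ∀ (k0 : Int), k0 ∈ K →
    ∀ (f f' : Int → Int), (∀ k ∈ K, k ≠ k0 → f k = f' k) →
    (K.map f).sum = (K.map f').sum + (f k0 - f' k0) := by
  intro K
  induction K with
  | nil => intro _ k0 hk; simp at hk
  | cons a K ih =>
    intro hnd k0 hk f f' h
    rcases List.nodup_cons.mp hnd with ⟨ha, hndK⟩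
    by_cases hak : a = k0
    · subst hak
      have : K.map f = K.map f' := by
        apply List.map_congr_left
        intro k hkK
        exact h k (List.mem_cons_of_mem _ hkK) (fun he => ha (he ▸ hkK))
      simp [this]; ring
    · have hk0K : k0 ∈ K := by
        rcases List.mem_cons.mp hk with h1 | h1
        · exact absurd h1.symm hak
        · exact h1
      have hfa : f a = f' a := h a (List.mem_cons_self) hak
      have := ih hndK k0 hk0K f f' (fun k hkK hne => h k (List.mem_cons_of_mem _ hkK) hne)
      simp [hfa, this]; ring

theorem pvS_eq_sum (l : List Int) :
    pvS l = ((PySem.Set.ofList l).map (fun k => pvG ((l.count k : Nat) : Int))).sum := by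
  unfold pvS
  have hv : (PySem.Dict.counter l).values
      = (PySem.Set.ofList l).map (fun k => ((l.count k : Nat) : Int)) := by
    show ((PySem.Dict.counter l).items).map Prod.snd = _
    rw [PySem.Dict.items_counter]
    simp [List.map_map, Function.comp]
  rw [hv, pvFoldlAdd pvG]
  simp [List.map_map, Function.comp_def]

theorem pvCount_append (l : List Int) (v k : Int) :
    (((l ++ [v]).count k : Nat) : Int) = ((l.count k : Nat) : Int) + (if k = v then 1 else 0) := by
  rw [List.count_append]
  by_cases h : k = v
  · simp [h]
  · simp [List.count_eq_zero, h]

theorem pvS_append (l : List Int) (v : Int) :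
    pvS (l ++ [v]) = pvS l + (l.count v : Nat) := by
  rw [pvS_eq_sum, pvS_eq_sum, PySem.Set.ofList_append_singleton]
  by_cases hv : v ∈ l
  · have hmem : v ∈ PySem.Set.ofList l := (PySem.Set.mem_ofList l v).mpr hv
    have hadd : (PySem.Set.ofList l).add v = PySem.Set.ofList l := by
      unfold PySem.Set.add
      simp [hmem]
    rw [hadd]
    have := pvSumMapUpdate (PySem.Set.ofList l) (PySem.Set.nodup_ofList l) v hmem
      (fun k => pvG (((l ++ [v]).count k : Nat) : Int))
      (fun k => pvG ((l.count k : Nat) : Int))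
      (by
        intro k hkmem hne
        simp only [pvCount_append, if_neg hne, add_zero])
    rw [this]
    simp [pvG_succ]
  · have hmem : v ∉ PySem.Set.ofList l := fun h => hv ((PySem.Set.mem_ofList l v).mp h)
    have hadd : (PySem.Set.ofList l).add v = PySem.Set.ofList l ++ [v] := by
      unfold PySem.Set.add
      simp [hmem]
    rw [hadd, List.map_append, List.sum_append]
    have hcong : (PySem.Set.ofList l).map (fun k => pvG (((l ++ [v]).count k : Nat) : Int))
        = (PySem.Set.ofList l).map (fun k => pvG ((l.count k : Nat) : Int)) := by
      apply List.map_congr_left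
      intro k hkmem
      have hkl : k ∈ l := (PySem.Set.mem_ofList l k).mp hkmem
      have hne : k ≠ v := fun he => hv (he ▸ hkl)
      simp only [pvCount_append, if_neg hne, add_zero]
    rw [hcong]
    have hcv : l.count v = 0 := List.count_eq_zero.mpr hv
    simp only [pvCount_append, hcv]
    simp [pvG, hcv]

theorem pvLoop1 : ∀ (vs l : List Int),
    vs.foldl pvStep1 (PySem.Dict.counter l, pvS l)
      = (PySem.Dict.counter (l ++ vs), pvS (l ++ vs)) := by
  intro vs
  induction vs with
  | nil => intro l; simp
  | cons v vs ih =>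
    intro l
    have hstep : pvStep1 (PySem.Dict.counter l, pvS l) v
        = (PySem.Dict.counter (l ++ [v]), pvS (l ++ [v])) := by
      unfold pvStep1
      rw [← PySem.Dict.counter_append_singleton, pvS_append]
      congr 1
      rw [PySem.Dict.contains_counter]
      by_cases hv : v ∈ l
      · simp [hv, PySem.Dict.getD_counter]
      · simp [hv, List.count_eq_zero.mpr hv]
    rw [List.foldl_cons, hstep, ih (l ++ [v])]
    simp

theorem pvInit : (PySem.Dict.ofList [((0 : Int), (1 : Int))], (0 : Int))
    = (PySem.Dict.counter [(0 : Int)], pvS [(0 : Int)]) := by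
  decide

theorem pvMain (t : List Int) :
    (t.foldl pvStep1 (PySem.Dict.ofList [((0 : Int), (1 : Int))], 0)).2 = pvS (0 :: t) := by
  rw [pvInit, pvLoop1 t [0]]
  rfl

-- ===== VERDICT (by name: the statement is the Claim_ definition above) =====
theorem arcWrecker2_spec : Claim_equal_arcWrecker2 := by
  intro nums _
  have hA := pvBridgeA (PySem.List.enumerate nums) (PySem.Dict.ofList [((0 : Int), (1 : Int))]) 0 0
  have hA2 := congrArg Prod.snd hA
  simp only at hA2
  have hB : arcWrecker2_alt nums = pvS ([0] ++ pvGen (PySem.List.enumerate nums) 0) := by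
    simp only [arcWrecker2_alt, pvBridgeB (PySem.List.enumerate nums) [0] 0]
    rfl
  show arcWrecker2 nums = arcWrecker2_alt nums
  unfold arcWrecker2
  rw [hA2, pvMain, hB]
  rfl
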